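-- pv_equiv track=rewrite | github.com/SuyashVoid/Google_Foobar | 4_1_Bringing-a-gun-to-a-trainer-fight/solution.py | ghostRoomCoordinateSeriesFinder
-- ===== SOURCE A (Python) =====
-- def findGhostCoordinate(ordinate, ghostRoomNum, dimensions):
--     # Return the ghostRoomNum'th reflection of the passed ordinate (could be x or y)
--
--     # The pattern of ordinates in the ghost rooms is that first the ordinate will be at 2*ordinate,
--     # then 2*(dimensions-ordinate), then last+(2*ordinate), then last+(2*(dimensions-ordinate)), etc.:
--     alternatingValues = [2 * ordinate, 2 * (dimensions - ordinate)]
--     direction = 1 if ghostRoomNum >= 0 else -1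
--     offset = 1 if direction == 1 else 0
--     for i in (range(abs(ghostRoomNum))):
--         ordinate += alternatingValues[(i + offset) % 2] * direction
--     # Return reflection for nth ghost room
--     return ordinate
--
-- def ghostRoomCoordinateSeriesFinder(ordinate, dimensions, distance):
--     # Return a list of lists of translation of given ordinate into ghost rooms (all the way until laser range is exceeded)
--
--     ghostCoordinates = []
--     # Run a loop for both x and y ordinates
--     for i in range(len(ordinate)):
--         # List of ordinates for all possible ghost rooms for given distance
--         ordinates = []
--         maxNegativeGhostRoomNum = -1 * (distance // dimensions[i]) - 1
--         maxPositiveGhostRoomNum = (distance // dimensions[i]) + 1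
--         # +1 in loop to include the Max ghost room as well
--         for j in range(maxNegativeGhostRoomNum, maxPositiveGhostRoomNum + 1):
--             ordinates.append(findGhostCoordinate(ordinate[i], j, dimensions[i]))
--         ghostCoordinates.append(ordinates)
--     return ghostCoordinates
-- ===== SOURCE B (Python) =====
-- def ghostRoomCoordinateSeriesFinder(ordinate, dimensions, distance):
--     # Closed form: the j'th reflection of o in a box of size d is
--     # o + j*d when j is even and -o + (j+1)*d when j is odd.
--     return [[o + j * d if j % 2 == 0 else -o + (j + 1) * d
--              for j in range(-(distance // d) - 1, distance // d + 2)]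
--             for o, d in zip(ordinate, dimensions)]
-- ===== Notes on version B (the rewrite author's own statement) =====
-- stated objective: faster
-- what changed: Replaces the per-room O(|j|) reflection loop (findGhostCoordinate) with a closed-form formula o+j*d / -o+(j+1)*d evaluated once per room, so each axis is one linear pass instead of quadratic recomputation from the origin.
import Mathlib
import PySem

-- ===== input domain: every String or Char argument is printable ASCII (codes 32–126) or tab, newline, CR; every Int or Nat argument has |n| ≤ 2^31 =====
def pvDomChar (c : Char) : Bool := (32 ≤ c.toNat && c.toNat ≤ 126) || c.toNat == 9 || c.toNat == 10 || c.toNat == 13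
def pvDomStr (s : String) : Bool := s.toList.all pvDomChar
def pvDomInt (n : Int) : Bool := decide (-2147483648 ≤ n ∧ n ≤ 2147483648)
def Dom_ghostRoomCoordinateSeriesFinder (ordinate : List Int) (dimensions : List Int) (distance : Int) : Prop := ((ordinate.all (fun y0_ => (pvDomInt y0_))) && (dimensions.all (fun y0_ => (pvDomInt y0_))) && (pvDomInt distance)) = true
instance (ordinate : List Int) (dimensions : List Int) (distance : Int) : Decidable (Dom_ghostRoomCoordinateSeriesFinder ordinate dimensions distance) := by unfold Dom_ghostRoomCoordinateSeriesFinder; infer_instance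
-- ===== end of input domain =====

-- B replaces A's per-room reflection loop by a closed-form formula, one linear pass per axis (faster, asymptotic).

-- ===== PORT A =====
-- findGhostCoordinate: the loop over range(abs(ghostRoomNum)); the list index (i+offset)%2
-- is always 0 or 1, so getD is exact here.
def findGhostCoordinate (ordinate : Int) (ghostRoomNum : Int) (dimensions : Int) : Int :=
  let alternatingValues : List Int := [2 * ordinate, 2 * (dimensions - ordinate)]
  let direction : Int := if ghostRoomNum ≥ 0 then 1 else -1
  let offset : Nat := if direction = 1 then 1 else 0
  (List.range ghostRoomNum.natAbs).foldl
    (fun o i => o + (alternatingValues.getD ((i + offset) % 2) 0) * direction) ordinate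

def ghostRoomCoordinateSeriesFinder (ordinate : List Int) (dimensions : List Int) (distance : Int) : List (List Int) :=
  (List.range ordinate.length).foldl
    (fun ghostCoordinates i =>
      let oi := ordinate.getD i 0          -- ordinate[i]; exact since i < len(ordinate) (Pre_ excludes IndexError on dimensions)
      let di := dimensions.getD i 0        -- dimensions[i]
      let maxNegativeGhostRoomNum := -1 * (PySem.Int.floordiv distance di) - 1
      let maxPositiveGhostRoomNum := (PySem.Int.floordiv distance di) + 1
      let ordinates :=
        (PySem.List.pyRange maxNegativeGhostRoomNum (maxPositiveGhostRoomNum + 1) 1).foldl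
          (fun ords j => ords ++ [findGhostCoordinate oi j di]) []
      ghostCoordinates ++ [ordinates]) []

-- ===== PORT B =====
def ghostRoomCoordinateSeriesFinder_alt (ordinate : List Int) (dimensions : List Int) (distance : Int) : List (List Int) :=
  (ordinate.zip dimensions).map (fun od =>
    let q := PySem.Int.floordiv distance od.2
    (PySem.List.pyRange (-q - 1) (q + 2) 1).map (fun j =>
      if PySem.Int.mod j 2 = 0 then od.1 + j * od.2 else -od.1 + (j + 1) * od.2))

-- ===== PRECONDITION & SPEC =====
-- Pre_ excludes exactly the inputs where Python A raises: an index i < len(ordinate) with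
-- dimensions[i] missing (IndexError) or dimensions[i] = 0 (ZeroDivisionError).
def Pre_ghostRoomCoordinateSeriesFinder (ordinate : List Int) (dimensions : List Int) (distance : Int) : Prop :=
  ordinate.length ≤ dimensions.length ∧ ∀ i, i < ordinate.length → dimensions.getD i 0 ≠ 0
instance (ordinate : List Int) (dimensions : List Int) (distance : Int) : Decidable (Pre_ghostRoomCoordinateSeriesFinder ordinate dimensions distance) := by unfold Pre_ghostRoomCoordinateSeriesFinder; infer_instance
def pvWitness_ghostRoomCoordinateSeriesFinder : List Int × List Int × Int := ([2, 3], [4, 5], 10)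

def Spec_ghostRoomCoordinateSeriesFinder (ordinate : List Int) (dimensions : List Int) (distance : Int) (out : List (List Int)) : Prop := out = ghostRoomCoordinateSeriesFinder_alt ordinate dimensions distance
instance (ordinate : List Int) (dimensions : List Int) (distance : Int) (out : List (List Int)) : Decidable (Spec_ghostRoomCoordinateSeriesFinder ordinate dimensions distance out) := by unfold Spec_ghostRoomCoordinateSeriesFinder; infer_instance

-- ===== CLAIM (what is proved, stated in full; the proofs are below) =====
def Claim_equal_ghostRoomCoordinateSeriesFinder : Prop := ∀ (ordinate : List Int) (dimensions : List Int) (distance : Int), Dom_ghostRoomCoordinateSeriesFinder ordinate dimensions distance → Pre_ghostRoomCoordinateSeriesFinder ordinate dimensions distance → Spec_ghostRoomCoordinateSeriesFinder ordinate dimensions distance (ghostRoomCoordinateSeriesFinder ordinate dimensions distance)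

-- ===== LEMMAS AND PROOFS =====

-- A's reflection loop for non-negative room numbers (direction 1, offset 1), closed form.
theorem foldPos (o d : Int) (n : Nat) :
    (List.range n).foldl
        (fun acc i => acc + (([2 * o, 2 * (d - o)] : List Int).getD ((i + 1) % 2) 0) * 1) o
      = if n % 2 = 0 then o + n * d else -o + ((n : Int) + 1) * d := by
  induction n with
  | zero => simp
  | succ n ih =>
    rw [List.range_succ, List.foldl_append, ih]
    rcases Nat.even_or_odd n with h | h
    · have h2 : n % 2 = 0 := Nat.even_iff.mp h
      have h3 : (n + 1) % 2 = 1 := by omega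
      simp [h2, h3, List.getD]
      ring
    · have h2 : n % 2 = 1 := Nat.odd_iff.mp h
      have h3 : (n + 1) % 2 = 0 := by omega
      simp [h2, h3, List.getD]
      ring

-- A's reflection loop for negative room numbers (direction -1, offset 0), closed form.
theorem foldNeg (o d : Int) (n : Nat) :
    (List.range n).foldl
        (fun acc i => acc + (([2 * o, 2 * (d - o)] : List Int).getD (i % 2) 0) * (-1)) o
      = if n % 2 = 0 then o - n * d else -o - ((n : Int) - 1) * d := by
  induction n with
  | zero => simp
  | succ n ih =>
    rw [List.range_succ, List.foldl_append, ih]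
    rcases Nat.even_or_odd n with h | h
    · have h2 : n % 2 = 0 := Nat.even_iff.mp h
      have h3 : (n + 1) % 2 = 1 := by omega
      simp [h2, h3, List.getD]
      ring
    · have h2 : n % 2 = 1 := Nat.odd_iff.mp h
      have h3 : (n + 1) % 2 = 0 := by omega
      simp [h2, h3, List.getD]
      ring

-- Closed form for findGhostCoordinate.
theorem findGhost_closed (o d j : Int) :
    findGhostCoordinate o j d =
      if PySem.Int.mod j 2 = 0 then o + j * d else -o + (j + 1) * d := by
  have hm : PySem.Int.mod j 2 = j % 2 := PySem.Int.mod_eq_emod_of_pos (by norm_num)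
  by_cases hj : j ≥ 0
  · obtain ⟨n, rfl⟩ : ∃ n : Nat, j = (n : Int) := ⟨j.toNat, by omega⟩
    have hdir : ((if (n : Int) ≥ 0 then (1 : Int) else -1)) = 1 := by simp
    have hna : ((n : Int)).natAbs = n := by omega
    unfold findGhostCoordinate
    simp only [hdir, hna, if_true]
    rw [foldPos]
    have : ((n : Int)) % 2 = ((n % 2 : Nat) : Int) := by omega
    rw [hm, this]
    by_cases h2 : n % 2 = 0
    · simp [h2]
    · have h2' : n % 2 = 1 := by omega
      simp [h2']
  · obtain ⟨n, rfl⟩ : ∃ n : Nat, j = -(n : Int) := ⟨j.natAbs, by omega⟩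
    have hn0 : 0 < n := by omega
    have hdir : ((if -(n : Int) ≥ 0 then (1 : Int) else -1)) = -1 := by
      rw [if_neg]; omega
    have hna : (-(n : Int)).natAbs = n := by omega
    unfold findGhostCoordinate
    simp only [hdir, hna]
    rw [if_neg (by norm_num)]
    simp only [Nat.add_zero]
    rw [foldNeg]
    have hmod : (-(n : Int)) % 2 = if n % 2 = 0 then (0 : Int) else 1 := by
      rcases Nat.even_or_odd n with h | h
      · have := Nat.even_iff.mp h; simp [this]; omega
      · have := Nat.odd_iff.mp h; simp [this]; omega
    rw [hm, hmod]
    by_cases h2 : n % 2 = 0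
    · simp [h2]; ring
    · simp [h2]; ring

theorem ghostRoomCoordinateSeriesFinder_spec : Claim_equal_ghostRoomCoordinateSeriesFinder := by
  intro ordinate dimensions distance _hDom hPre
  obtain ⟨hlen, hnz⟩ := hPre
  unfold Spec_ghostRoomCoordinateSeriesFinder
  unfold ghostRoomCoordinateSeriesFinder ghostRoomCoordinateSeriesFinder_alt
  simp only [PySem.List.foldl_append_singleton_eq_map, List.nil_append]
  apply List.ext_getElem
  · simp [List.length_zip]; omega
  · intro k hk1 hk2
    simp only [List.getElem_map, List.getElem_range, List.getElem_zip]
    have hk : k < ordinate.length := by simpa using hk1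
    have hkd : k < dimensions.length := by omega
    have ho : ordinate.getD k 0 = ordinate[k] := List.getD_eq_getElem _ _ hk
    have hd : dimensions.getD k 0 = dimensions[k] := List.getD_eq_getElem _ _ hkd
    rw [ho, hd]
    have hrange : -1 * (PySem.Int.floordiv distance dimensions[k]) - 1
        = -(PySem.Int.floordiv distance dimensions[k]) - 1 := by ring
    have hrange2 : PySem.Int.floordiv distance dimensions[k] + 1 + 1
        = PySem.Int.floordiv distance dimensions[k] + 2 := by ring
    rw [hrange, hrange2]
    apply List.map_congr_left
    intro j _
    exact findGhost_closed ordinate[k] dimensions[k] j
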